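-- pv_equiv track=rewrite | github.com/iplweb/bpp | src/pbn_export_queue/views.py | extract_pbn_error_from_komunikat
-- ===== SOURCE A (Python) =====
-- def extract_pbn_error_from_komunikat(komunikat):
--     """
--     Extract PBN API error from komunikat field (traceback).
--     Looks for the last line containing 'pbn_api.exceptions'.
--
--     Returns the exception line or None if not found.
--     """
--     if not komunikat:
--         return None
--
--     lines = komunikat.strip().split("\n")
--
--     # Search from the end for a line with pbn_api.exceptions
--     for line in reversed(lines):
--         if "pbn_api.exceptions" in line:
--             return line.strip()
--
--     return None
-- ===== SOURCE B (Python) =====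
-- def extract_pbn_error_from_komunikat(komunikat):
--     if not komunikat:
--         return None
--     lines = komunikat.strip().split("\n")
--     matches = [line.strip() for line in lines if "pbn_api.exceptions" in line]
--     return matches[-1] if matches else None
-- ===== Notes on version B (the rewrite author's own statement) =====
-- stated objective: simpler
-- what changed: Replaces the reversed-scan-with-early-return loop by a forward filter of all matching lines (stripped) followed by selecting the last by index.
import Mathlib
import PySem

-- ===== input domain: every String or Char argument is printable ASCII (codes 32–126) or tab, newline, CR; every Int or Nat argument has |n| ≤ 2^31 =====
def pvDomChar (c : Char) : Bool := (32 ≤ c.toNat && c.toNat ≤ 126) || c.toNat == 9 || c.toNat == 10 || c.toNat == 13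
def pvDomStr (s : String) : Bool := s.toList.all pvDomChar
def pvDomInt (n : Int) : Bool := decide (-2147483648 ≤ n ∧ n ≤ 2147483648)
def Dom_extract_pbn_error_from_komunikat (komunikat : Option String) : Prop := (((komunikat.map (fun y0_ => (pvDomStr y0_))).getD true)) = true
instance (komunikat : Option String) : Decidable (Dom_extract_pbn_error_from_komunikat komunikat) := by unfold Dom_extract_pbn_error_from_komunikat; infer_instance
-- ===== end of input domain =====

-- B replaces A's reversed scan with an early return by a forward filter of matching lines followed by taking the last (simpler decomposition, same cost).


-- ===== PORT A =====
-- A: scan the lines from the end, return the first (i.e. last) matching line stripped.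
def pvLoopA : List String → Option String
  | [] => none
  | l :: rest =>
    if PySem.Str.isIn "pbn_api.exceptions" l then some (PySem.Str.strip l) else pvLoopA rest

def extract_pbn_error_from_komunikat (komunikat : Option String) : Option String :=
  match komunikat with
  | none => none
  | some s =>
    if s = "" then none
    else
      let lines := (PySem.Str.split? (PySem.Str.strip s) "\n").getD []  -- sep "\n" ≠ "", so split? is `some`: exact s.strip().split("\n")
      pvLoopA lines.reverse

-- ===== PORT B =====
-- B: collect every matching line (stripped) in one forward pass, take the last.
def extract_pbn_error_from_komunikat_alt (komunikat : Option String) : Option String :=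
  match komunikat with
  | none => none
  | some s =>
    if s = "" then none
    else
      let lines := (PySem.Str.split? (PySem.Str.strip s) "\n").getD []  -- sep "\n" ≠ "", so split? is `some`: exact s.strip().split("\n")
      let hits := (lines.filter (fun l => PySem.Str.isIn "pbn_api.exceptions" l)).map PySem.Str.strip
      hits.getLast?

-- ===== PRECONDITION & SPEC =====
def Spec_extract_pbn_error_from_komunikat (komunikat : Option String) (out : Option String) : Prop := out = extract_pbn_error_from_komunikat_alt komunikat
instance (komunikat : Option String) (out : Option String) : Decidable (Spec_extract_pbn_error_from_komunikat komunikat out) := by unfold Spec_extract_pbn_error_from_komunikat; infer_instance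

-- ===== CLAIM =====
def Claim_equal_extract_pbn_error_from_komunikat : Prop := ∀ (komunikat : Option String), Dom_extract_pbn_error_from_komunikat komunikat → Spec_extract_pbn_error_from_komunikat komunikat (extract_pbn_error_from_komunikat komunikat)

-- ===== LEMMAS AND PROOFS =====
theorem pvLoopA_eq_head (ys : List String) :
    pvLoopA ys = ((ys.filter (fun l => PySem.Str.isIn "pbn_api.exceptions" l)).map PySem.Str.strip).head? := by
  induction ys with
  | nil => rfl
  | cons l rest ih =>
    cases h : PySem.Str.isIn "pbn_api.exceptions" l with
    | true => simp [pvLoopA, h, -PySem.Str.isIn_eq]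
    | false => simp [pvLoopA, h, ih, -PySem.Str.isIn_eq]

theorem pvLoopA_reverse (xs : List String) :
    pvLoopA xs.reverse = ((xs.filter (fun l => PySem.Str.isIn "pbn_api.exceptions" l)).map PySem.Str.strip).getLast? := by
  rw [pvLoopA_eq_head, ← List.head?_reverse, List.filter_reverse, List.map_reverse]

-- ===== VERDICT =====
theorem extract_pbn_error_from_komunikat_spec : Claim_equal_extract_pbn_error_from_komunikat := by
  intro komunikat _
  unfold Spec_extract_pbn_error_from_komunikat
  cases komunikat with
  | none => rfl
  | some s =>
    by_cases h : s = ""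
    · simp [extract_pbn_error_from_komunikat, extract_pbn_error_from_komunikat_alt, h]
    · simp only [extract_pbn_error_from_komunikat, extract_pbn_error_from_komunikat_alt, h,
        if_false]
      exact pvLoopA_reverse _
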